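-- pv_equiv track=rewrite | github.com/Tenebrar/codebase | advent_of_code/year2018/day5/part2_smallest.py | react
-- ===== SOURCE A (Python) =====
-- def matches(char1: str, char2: str) -> bool:
--     return char1 != char2 and char1.lower() == char2.lower()
--
-- def react(polymer, ignore: str):
--     stack = ['.']
--     for c in polymer:
--         if c == ignore or c.lower() == ignore:
--             pass
--         elif matches(c, stack[-1]):
--             stack.pop()
--         else:
--             stack.append(c)
--     stack.pop(0)
--     return len(stack)
-- ===== SOURCE B (Python) =====
-- def react(polymer, ignore: str):
--     # Keep only the units that are not ignored (same test as A's skip branch).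
--     units = [c for c in polymer if not (c == ignore or c.lower() == ignore)]
--     # Repeatedly sweep the whole polymer, removing every adjacent reactive
--     # pair found in one left-to-right pass, until a pass removes nothing.
--     while True:
--         out = []
--         i = 0
--         n = len(units)
--         while i < n:
--             if i + 1 < n and units[i] != units[i + 1] and units[i].lower() == units[i + 1].lower():
--                 i += 2
--             else:
--                 out.append(units[i])
--                 i += 1
--         if len(out) == n:
--             return len(out)
--         units = out
-- ===== Notes on version B (the rewrite author's own statement) =====
-- stated objective: alternative
-- what changed: B filters the ignored unit first and then, instead of A's single stack scan, repeatedly sweeps the string removing all adjacent reactive pairs per pass until a pass removes nothing; confluence of the reduction gives the same final length.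
import Mathlib
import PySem

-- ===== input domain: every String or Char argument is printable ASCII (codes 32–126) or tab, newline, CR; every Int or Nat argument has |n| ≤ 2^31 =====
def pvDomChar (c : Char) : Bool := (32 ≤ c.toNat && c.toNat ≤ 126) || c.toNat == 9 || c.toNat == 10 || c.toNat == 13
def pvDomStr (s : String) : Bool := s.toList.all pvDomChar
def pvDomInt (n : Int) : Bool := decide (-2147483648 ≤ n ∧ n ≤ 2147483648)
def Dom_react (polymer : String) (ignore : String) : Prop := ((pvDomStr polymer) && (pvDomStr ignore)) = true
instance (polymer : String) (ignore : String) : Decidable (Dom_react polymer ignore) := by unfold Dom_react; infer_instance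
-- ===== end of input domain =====

-- B: instead of A's single stack scan, it filters the ignored unit out first and then
-- repeatedly sweeps the string, removing all adjacent reactive pairs in each pass, until
-- a pass removes nothing (alternative algorithm; same final length, proved below).


-- ===== PORT A =====
-- Python's `matches(char1, char2)` on the 1-char strings A feeds it:
-- `str.lower()` of a single char is `PySem.Chars.lowerChar`.
def pyMatches (c1 c2 : Char) : Bool :=
  c1 != c2 && (PySem.Chars.lowerChar c1 == PySem.Chars.lowerChar c2)

-- Python's `c == ignore or c.lower() == ignore` (c a 1-char string, ignore any string).
def isIgnored (c : Char) (ignore : String) : Bool :=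
  (String.ofList [c] == ignore) || (PySem.Str.lower (String.ofList [c]) == ignore)

-- One iteration of A's for-loop.  The Python list `stack` (append/pop at the right,
-- `stack[-1]` its last element) is held TOP-FIRST here: append = cons, stack[-1] = head,
-- pop = tail; the `[]` case is unreachable (the sentinel is never popped).
def reactStep (ignore : String) (st : List Char) (c : Char) : List Char :=
  if isIgnored c ignore then st
  else match st with
    | top :: rest => if pyMatches c top then rest else c :: top :: rest
    | [] => [c]

def react (polymer : String) (ignore : String) : Int :=
  let stack := polymer.toList.foldl (reactStep ignore) ['.']
  -- stack.pop(0) removes the bottom element (the sentinel) = the LAST of our top-first list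
  ((stack.dropLast).length : Int)

-- ===== PORT B =====
-- One left-to-right pass of Source B's inner while-loop: drop each adjacent reactive pair.
def onePass : List Char → List Char
  | a :: b :: t => if pyMatches a b then onePass t else a :: onePass (b :: t)
  | s => s

-- needed by passLoop's decreasing_by
theorem onePass_len_le (s : List Char) : (onePass s).length ≤ s.length := by
  induction s using onePass.induct with
  | case1 a b t hm ih => simp only [onePass, hm, if_true]; simp at ih ⊢; omega
  | case2 a b t hm ih => simp only [onePass, hm]; simp at ih ⊢; omega
  | case3 s h1 => simp [onePass]

-- Source B's outer while-loop: pass until a pass removes nothing.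
def passLoop (s : List Char) : List Char :=
  let t := onePass s
  if _h : t.length = s.length then t else passLoop t
termination_by s.length
decreasing_by exact lt_of_le_of_ne (onePass_len_le s) _h

def react_alt (polymer : String) (ignore : String) : Int :=
  ((passLoop (polymer.toList.filter (fun c => !(isIgnored c ignore)))).length : Int)

-- ===== PRECONDITION & SPEC =====
def Spec_react (polymer : String) (ignore : String) (out : Int) : Prop := out = react_alt polymer ignore
instance (polymer : String) (ignore : String) (out : Int) : Decidable (Spec_react polymer ignore out) := by unfold Spec_react; infer_instance

-- ===== CLAIM (what is proved, stated in full; the proofs are below) =====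
def Claim_equal_react : Prop := ∀ (polymer : String) (ignore : String), Dom_react polymer ignore → Spec_react polymer ignore (react polymer ignore)

-- ===== LEMMAS AND PROOFS =====

-- A's step with the ignore test stripped out (the proof separates the two concerns).
def step0 (st : List Char) (c : Char) : List Char :=
  match st with
  | top :: rest => if pyMatches c top then rest else c :: top :: rest
  | [] => [c]

-- a stack/string with no adjacent reactive pair
def Irred (st : List Char) : Prop := List.IsChain (fun a b => pyMatches a b = false) st

theorem pyMatches_iff {a b : Char} :
    pyMatches a b = true ↔ a ≠ b ∧ PySem.Chars.lowerChar a = PySem.Chars.lowerChar b := by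
  simp [pyMatches]

theorem pyMatches_comm (a b : Char) : pyMatches a b = pyMatches b a := by
  rw [← Bool.coe_iff_coe, pyMatches_iff, pyMatches_iff]
  exact ⟨fun ⟨h1, h2⟩ => ⟨h1.symm, h2.symm⟩, fun ⟨h1, h2⟩ => ⟨h1.symm, h2.symm⟩⟩

theorem upper_bounds {p : Char} (h : PySem.Chars.isupper p = true) :
    65 ≤ p.toNat ∧ p.toNat ≤ 90 := by
  simp [PySem.Chars.isupper, Char.le_def] at h; exact h

theorem toNat_eq_char_eq {p q : Char} (h : p.toNat = q.toNat) : p = q := by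
  have := Char.ofNat_toNat p
  rw [h, Char.ofNat_toNat q] at this; exact this.symm

theorem toNat_ofNat_small {n : Nat} (h : n < 55296) : (Char.ofNat n).toNat = n := by
  rw [Char.toNat_ofNat]
  simp [Nat.isValidChar, h]

-- two distinct chars share a lowercase exactly when they are an upper/lower pair
theorem lowerChar_pair {p q : Char} (h : PySem.Chars.lowerChar p = PySem.Chars.lowerChar q)
    (hne : p ≠ q) :
    (PySem.Chars.isupper p = true ∧ PySem.Chars.isupper q = false ∧ q.toNat = p.toNat + 32) ∨
    (PySem.Chars.isupper q = true ∧ PySem.Chars.isupper p = false ∧ p.toNat = q.toNat + 32) := by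
  unfold PySem.Chars.lowerChar at h
  by_cases hp : PySem.Chars.isupper p = true <;> by_cases hq : PySem.Chars.isupper q = true <;>
    simp [hp, hq] at h
  · exact absurd (toNat_eq_char_eq (by
      have h1 := congrArg Char.toNat h
      rw [toNat_ofNat_small (by have := upper_bounds hp; omega),
          toNat_ofNat_small (by have := upper_bounds hq; omega)] at h1
      omega)) hne
  · left
    refine ⟨hp, by simpa using hq, ?_⟩
    have := congrArg Char.toNat h
    rw [toNat_ofNat_small (by have := upper_bounds hp; omega)] at this
    omega
  · right
    refine ⟨hq, by simpa using hp, ?_⟩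
    have := congrArg Char.toNat h
    rw [toNat_ofNat_small (by have := upper_bounds hq; omega)] at this
    omega
  · exact absurd h hne

-- a reactive partner is unique: if x reacts with a and a reacts with b then x = b
theorem pyMatches_pair {x a b : Char} (h1 : pyMatches x a = true) (h2 : pyMatches a b = true) :
    x = b := by
  obtain ⟨hne1, hl1⟩ := pyMatches_iff.mp h1
  obtain ⟨hne2, hl2⟩ := pyMatches_iff.mp h2
  rcases lowerChar_pair hl1 hne1 with ⟨u1, u2, e1⟩ | ⟨u1, u2, e1⟩ <;>
    rcases lowerChar_pair hl2 hne2 with ⟨v1, v2, e2⟩ | ⟨v1, v2, e2⟩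
  · rw [u2] at v1; exact absurd v1 (by simp)
  · exact toNat_eq_char_eq (by omega)
  · exact toNat_eq_char_eq (by omega)
  · rw [u1] at v2; exact absurd v2 (by simp)

-- nothing reacts with the sentinel '.'
theorem pyMatches_dot (c : Char) : pyMatches c '.' = false := by
  by_cases hc : c = '.'
  · simp [pyMatches, hc]
  · have h : PySem.Chars.lowerChar c ≠ PySem.Chars.lowerChar '.' := by
      have hdot : PySem.Chars.lowerChar '.' = '.' := by decide
      rw [hdot]
      unfold PySem.Chars.lowerChar
      by_cases hu : PySem.Chars.isupper c = true
      · simp only [hu, if_true]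
        intro heq
        have h1 := congrArg Char.toNat heq
        have hb := upper_bounds hu
        rw [toNat_ofNat_small (by omega)] at h1
        have : ('.' : Char).toNat = 46 := by decide
        omega
      · rw [if_neg hu]
        exact hc
    simp [pyMatches, h]

theorem step0_irred {st : List Char} (h : Irred st) (c : Char) : Irred (step0 st c) := by
  unfold Irred at *
  cases st with
  | nil => simp [step0]
  | cons x r =>
    by_cases hm : pyMatches c x = true
    · simp only [step0, hm, if_true]
      exact h.tail
    · simp only [step0, hm]
      exact List.isChain_cons_cons.mpr ⟨by simpa using hm, h⟩

theorem step0_step0 {st : List Char} (h : Irred st) {a b : Char} (hm : pyMatches a b = true) :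
    step0 (step0 st a) b = st := by
  cases st with
  | nil => simp [step0, pyMatches_comm b a ▸ hm]
  | cons x r =>
    by_cases hx : pyMatches a x = true
    · have hxb : x = b := pyMatches_pair ((pyMatches_comm a x) ▸ hx) hm
      subst hxb
      cases r with
      | nil => simp [step0, hx]
      | cons y r' =>
        have hxy : pyMatches x y = false := (List.isChain_cons_cons.mp h).1
        simp [step0, hx, hxy]
    · have hba : pyMatches b a = true := (pyMatches_comm a b) ▸ hm
      simp [step0, hx, hba]

-- one pass does not change the stack-reduction result
theorem foldl_onePass (s : List Char) :
    ∀ st, Irred st → List.foldl step0 st (onePass s) = List.foldl step0 st s := by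
  induction s using onePass.induct with
  | case1 a b t hm ih =>
    intro st h
    simp only [onePass, hm, if_true]
    rw [ih st h]
    show List.foldl step0 st t = List.foldl step0 (step0 (step0 st a) b) t
    rw [step0_step0 h hm]
  | case2 a b t hm ih =>
    intro st h
    simp only [onePass, hm, List.foldl_cons]
    exact ih (step0 st a) (step0_irred h a)
  | case3 s h1 =>
    intro st _
    rcases s with _ | ⟨a, _ | ⟨b, t⟩⟩
    · rfl
    · rfl
    · exact absurd rfl (h1 a b t)

theorem onePass_eq_of_len {s : List Char} (h : (onePass s).length = s.length) : onePass s = s := by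
  induction s using onePass.induct with
  | case1 a b t hm ih =>
    exfalso
    have := onePass_len_le t
    simp only [onePass, hm, if_true] at h
    simp [List.length_cons] at h
    omega
  | case2 a b t hm ih =>
    rw [onePass, if_neg hm] at h ⊢
    have h2 : (onePass (b :: t)).length = (b :: t).length := by
      simp [List.length_cons] at h ⊢; omega
    rw [ih h2]
  | case3 s h1 =>
    rcases s with _ | ⟨a, _ | ⟨b, t⟩⟩
    · rfl
    · rfl
    · exact absurd rfl (h1 a b t)

theorem passLoop_fix (s : List Char) : onePass (passLoop s) = passLoop s := by
  rw [passLoop]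
  split
  · next h =>
    have he := onePass_eq_of_len h
    rw [he]; exact he
  · next h => exact passLoop_fix (onePass s)
termination_by s.length
decreasing_by exact lt_of_le_of_ne (onePass_len_le s) ‹_›

theorem foldl_passLoop (s : List Char) :
    List.foldl step0 [] (passLoop s) = List.foldl step0 [] s := by
  rw [passLoop]
  split
  · next h => rw [onePass_eq_of_len h]
  · next h =>
    rw [foldl_passLoop (onePass s)]
    exact foldl_onePass s [] List.IsChain.nil
termination_by s.length
decreasing_by exact lt_of_le_of_ne (onePass_len_le s) ‹_›

-- a fixed point of the pass has no adjacent reactive pair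
theorem chain'_of_fix {s : List Char} (h : onePass s = s) : Irred s := by
  induction s using onePass.induct with
  | case1 a b t hm ih =>
    exfalso
    simp only [onePass, hm, if_true] at h
    have h1 := congrArg List.length h
    have := onePass_len_le t
    simp at h1
    omega
  | case2 a b t hm ih =>
    rw [onePass, if_neg hm] at h
    injection h with h1 h2
    exact List.isChain_cons_cons.mpr ⟨by simpa using hm, ih h2⟩
  | case3 s h1 =>
    unfold Irred
    match s, h1 with
    | [], _ => exact List.IsChain.nil
    | [a], _ => exact List.isChain_singleton a
    | a :: b :: t, h1 => exact absurd rfl (h1 a b t)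

-- reducing an already-irreducible string just stacks it up
theorem foldl_of_chain' (u : List Char) :
    ∀ st, Irred (st.reverse ++ u) → List.foldl step0 st u = u.reverse ++ st := by
  induction u with
  | nil => intro st _; simp
  | cons a v ih =>
    intro st h
    have hstep : step0 st a = a :: st := by
      cases st with
      | nil => rfl
      | cons x r =>
        have hxa : pyMatches x a = false := by
          obtain ⟨-, -, hlink⟩ := List.isChain_append.mp h
          exact hlink x (by simp [List.getLast?_reverse]) a rfl
        have : pyMatches a x = false := (pyMatches_comm x a) ▸ hxa
        simp [step0, this]
    rw [List.foldl_cons, hstep, ih (a :: st) (by simpa using h)]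
    simp

theorem foldl_reactStep (ignore : String) (cs : List Char) :
    ∀ st, List.foldl (reactStep ignore) st cs
      = List.foldl step0 st (cs.filter (fun c => !(isIgnored c ignore))) := by
  induction cs with
  | nil => intro st; rfl
  | cons c cs ih =>
    intro st
    by_cases hc : isIgnored c ignore
    · simp [hc, reactStep, ih]
    · have hr : reactStep ignore st c = step0 st c := by
        cases st <;> simp [reactStep, step0, hc]
      simp [hc, List.foldl_cons, hr, ih]

-- the sentinel stays untouched at the bottom
theorem foldl_step0_sentinel (cs : List Char) :
    ∀ st, List.foldl step0 (st ++ ['.']) cs = List.foldl step0 st cs ++ ['.'] := by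
  induction cs with
  | nil => intro st; rfl
  | cons c cs ih =>
    intro st
    have hstep : step0 (st ++ ['.']) c = step0 st c ++ ['.'] := by
      cases st with
      | nil => simp [step0, pyMatches_dot c]
      | cons x r =>
        by_cases hm : pyMatches c x = true <;> simp [step0, hm]
    rw [List.foldl_cons, hstep, ih, List.foldl_cons]

-- ===== VERDICT (by name: the statement is the Claim_ definition above) =====
theorem react_spec : Claim_equal_react := by
  intro polymer ignore _
  unfold Spec_react react react_alt
  dsimp only
  set u := polymer.toList.filter (fun c => !(isIgnored c ignore)) with hu
  rw [foldl_reactStep ignore polymer.toList ['.'], ← hu]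
  have hsent : List.foldl step0 ((([] : List Char)) ++ ['.']) u
      = List.foldl step0 [] u ++ ['.'] := foldl_step0_sentinel u []
  simp only [List.nil_append] at hsent
  rw [hsent, List.dropLast_concat]
  have hfix : onePass (passLoop u) = passLoop u := passLoop_fix u
  have hirr : Irred (passLoop u) := chain'_of_fix hfix
  have h1 : List.foldl step0 [] (passLoop u) = (passLoop u).reverse ++ [] :=
    foldl_of_chain' (passLoop u) [] (by simpa using hirr)
  have h2 : List.foldl step0 [] (passLoop u) = List.foldl step0 [] u := foldl_passLoop u
  have hlen : (List.foldl step0 [] u).length = (passLoop u).length := by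
    rw [← h2, h1]; simp
  exact congrArg Int.ofNat hlen
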